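-- pv_equiv track=rewrite | github.com/pidang1/ClipFarm | cherrypick.py | find_position_with_ngrams
-- ===== SOURCE A (Python) =====
-- def find_position_with_ngrams(words, ngram_index, n, find_last=False):
--     if len(words) < n:
--         return None
--
--     positions = []
--
--     # Try each possible n-gram from the words
--     for i in range(len(words) - n + 1):
--         ngram = tuple(words[i:i+n])
--         if ngram in ngram_index:
--             # Found a match
--             if find_last:
--                 # For end position, take the last occurrence
--                 positions.extend(ngram_index[ngram])
--             else:
--                 # For start position, prefer earlier occurrences
--                 positions.extend(ngram_index[ngram])
--
--     if positions:
--         if find_last: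
--             # For end position, take the last occurrence plus offset to include all matched words
--             return max(positions) + (n - 1)  # Add offset for n-gram length
--         else:
--             # For start position, take the earliest occurrence
--             return min(positions)
--
--     return None
-- ===== SOURCE B (Python) =====
-- def find_position_with_ngrams(words, ngram_index, n, find_last=False):
--     # Invert the scan: build the set of window n-grams once, then make one
--     # pass over the index, keeping a running extremum instead of a list.
--     windows = {tuple(words[i:i+n]) for i in range(len(words) - n + 1)}
--     best = None
--     for ngram, values in ngram_index.items():
--         if ngram in windows:
--             for p in values:
--                 if best is None or (p > best if find_last else p < best):
--                     best = p
--     if best is None: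
--         return None
--     return best + (n - 1) if find_last else best
-- ===== Notes on version B (the rewrite author's own statement) =====
-- stated objective: alternative
-- what changed: B inverts the scan: instead of looking up each of the len(words)-n+1 word windows in the index and accumulating a positions list, it builds the window set once, iterates over ngram_index.items() filtering by that set, and keeps a running min/max instead of materialising a list.
import Mathlib
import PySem

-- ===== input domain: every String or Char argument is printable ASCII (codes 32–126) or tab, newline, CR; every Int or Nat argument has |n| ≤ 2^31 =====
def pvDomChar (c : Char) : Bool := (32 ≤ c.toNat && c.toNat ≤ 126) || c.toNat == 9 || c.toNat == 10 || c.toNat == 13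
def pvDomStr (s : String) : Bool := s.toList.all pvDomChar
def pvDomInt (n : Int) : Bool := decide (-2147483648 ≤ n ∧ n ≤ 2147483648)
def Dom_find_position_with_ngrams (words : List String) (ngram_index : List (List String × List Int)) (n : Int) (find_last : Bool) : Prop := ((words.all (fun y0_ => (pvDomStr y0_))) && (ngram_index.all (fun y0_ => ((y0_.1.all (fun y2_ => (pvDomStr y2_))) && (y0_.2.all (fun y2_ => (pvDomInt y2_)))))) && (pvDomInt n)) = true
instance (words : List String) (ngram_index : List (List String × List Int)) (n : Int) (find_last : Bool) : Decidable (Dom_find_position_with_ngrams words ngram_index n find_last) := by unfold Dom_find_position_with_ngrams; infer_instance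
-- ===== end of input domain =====

-- B inverts A's scan: instead of looking each word-window up in the index, it builds the
-- set of windows once and makes a single pass over the index keeping a running extremum
-- (no positions list); objective: alternative decomposition of the same cost.


-- ===== PORT A =====
def find_position_with_ngrams (words : List String) (ngram_index : List (List String × List Int)) (n : Int) (find_last : Bool) : Option Int :=
  if (words.length : Int) < n then none
  else
    let d := PySem.Dict.mk ngram_index
    let positions : List Int :=
      (PySem.List.pyRange 0 ((words.length : Int) - n + 1) 1).foldl
        (fun positions i =>
          let ngram := PySem.List.slice words (some i) (some (i + n))
          match d.get? ngram with
          | some vs => if find_last then positions ++ vs else positions ++ vs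
          | none => positions) []
    if positions ≠ [] then
      -- positions is nonempty here, so max?/min? mirror Python's max/min exactly
      if find_last then (PySem.List.max? positions (fun x => x)).map (fun m => m + (n - 1))
      else PySem.List.min? positions (fun x => x)
    else none

-- ===== PORT B =====
def find_position_with_ngrams_alt (words : List String) (ngram_index : List (List String × List Int)) (n : Int) (find_last : Bool) : Option Int :=
  let windows : PySem.Set (List String) :=
    PySem.Set.ofList ((PySem.List.pyRange 0 ((words.length : Int) - n + 1) 1).map
      (fun i => PySem.List.slice words (some i) (some (i + n))))
  let best : Option Int :=
    ngram_index.foldl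
      (fun best kv =>
        if kv.1 ∈ windows then
          kv.2.foldl
            (fun best p =>
              match best with
              | none => some p
              | some m => if (if find_last then m < p else p < m) then some p else some m)
            best
        else best) none
  match best with
  | none => none
  | some b => if find_last then some (b + (n - 1)) else some b

-- ===== PRECONDITION & SPEC =====
-- Pre_ excludes association lists with duplicate n-gram keys: such a list can never arise
-- from A's Python dict argument, and on it A's first-match lookup vs B's item iteration
-- are both accidental readings of a malformed dict.
def Pre_find_position_with_ngrams (words : List String) (ngram_index : List (List String × List Int)) (n : Int) (find_last : Bool) : Prop :=
  (ngram_index.map Prod.fst).Nodup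
instance (words : List String) (ngram_index : List (List String × List Int)) (n : Int) (find_last : Bool) : Decidable (Pre_find_position_with_ngrams words ngram_index n find_last) := by unfold Pre_find_position_with_ngrams; infer_instance

def pvWitness_find_position_with_ngrams : List String × (List (List String × List Int)) × Int × Bool :=
  (["a", "b"], [(["a"], [3]), (["b"], [1])], 1, false)

def Spec_find_position_with_ngrams (words : List String) (ngram_index : List (List String × List Int)) (n : Int) (find_last : Bool) (out : Option Int) : Prop := out = find_position_with_ngrams_alt words ngram_index n find_last
instance (words : List String) (ngram_index : List (List String × List Int)) (n : Int) (find_last : Bool) (out : Option Int) : Decidable (Spec_find_position_with_ngrams words ngram_index n find_last out) := by unfold Spec_find_position_with_ngrams; infer_instance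

-- ===== CLAIM (what is proved, stated in full; the proofs are below) =====
def Claim_equal_find_position_with_ngrams : Prop := ∀ (words : List String) (ngram_index : List (List String × List Int)) (n : Int) (find_last : Bool), Dom_find_position_with_ngrams words ngram_index n find_last → Pre_find_position_with_ngrams words ngram_index n find_last → Spec_find_position_with_ngrams words ngram_index n find_last (find_position_with_ngrams words ngram_index n find_last)

-- ===== LEMMAS AND PROOFS =====

-- the window list both programs scan
def pvW (words : List String) (n : Int) : List (List String) :=
  (PySem.List.pyRange 0 ((words.length : Int) - n + 1) 1).map
    (fun i => PySem.List.slice words (some i) (some (i + n)))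

-- the positions A collects
def pvPA (words : List String) (ngram_index : List (List String × List Int)) (n : Int) : List Int :=
  (pvW words n).flatMap (fun w => ((PySem.Dict.mk ngram_index).get? w).getD [])

-- the positions B scans
def pvPB (words : List String) (ngram_index : List (List String × List Int)) (n : Int) : List Int :=
  (ngram_index.filter (fun kv => decide (kv.1 ∈ pvW words n))).flatMap (fun kv => kv.2)

-- the common reduction of a position list to the answer
def pvNorm (n : Int) (find_last : Bool) (P : List Int) : Option Int :=
  if find_last then (PySem.List.max? P (fun x => x)).map (fun m => m + (n - 1))
  else PySem.List.min? P (fun x => x)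

theorem pvNorm_nil (n : Int) (fl : Bool) : pvNorm n fl [] = none := by
  cases fl <;> rfl

theorem A_eq_norm (words : List String) (idx : List (List String × List Int)) (n : Int) (fl : Bool) :
    find_position_with_ngrams words idx n fl = pvNorm n fl (pvPA words idx n) := by
  unfold find_position_with_ngrams
  by_cases hg : (words.length : Int) < n
  · have hr : PySem.List.pyRange 0 ((words.length : Int) - n + 1) 1 = [] := by
      rw [List.eq_nil_iff_forall_not_mem]
      intro x hx
      rw [PySem.List.mem_pyRange_one] at hx
      omega
    have hPA : pvPA words idx n = [] := by simp [pvPA, pvW, hr]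
    simp [hg, hPA, pvNorm_nil]
  · simp only [if_neg hg]
    have hfold :
        (PySem.List.pyRange 0 ((words.length : Int) - n + 1) 1).foldl
          (fun positions i =>
            let ngram := PySem.List.slice words (some i) (some (i + n))
            match (PySem.Dict.mk idx).get? ngram with
            | some vs => if fl then positions ++ vs else positions ++ vs
            | none => positions) [] = pvPA words idx n := by
      rw [PySem.List.foldl_congr_mem
        (g := fun positions i =>
          positions ++ (((PySem.Dict.mk idx).get? (PySem.List.slice words (some i) (some (i + n)))).getD []))]
      · rw [PySem.List.foldl_append_eq_flatMap]
        simp [pvPA, pvW, List.flatMap_map]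
      · intro acc i _
        cases hd : (PySem.Dict.mk idx).get? (PySem.List.slice words (some i) (some (i + n))) <;>
          simp [hd]
    rw [hfold]
    by_cases hp : pvPA words idx n = []
    · simp [hp, pvNorm_nil]
    · simp only [if_pos (by simpa using hp : ¬ pvPA words idx n = [])]
      cases fl <;> simp [pvNorm]

-- the running-extremum step of B, after seeding with the first position
theorem run_some (fl : Bool) (t : List Int) (m : Int) :
    t.foldl
      (fun best p =>
        match best with
        | none => some p
        | some m => if (if fl then m < p else p < m) then some p else some m) (some m) =
    some (t.foldl (fun m p => if (if fl then m < p else p < m) then p else m) m) := by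
  induction t generalizing m with
  | nil => rfl
  | cons x t ih =>
    rw [List.foldl_cons, List.foldl_cons]
    show List.foldl
        (fun (best : Option Int) p =>
          match best with
          | none => some p
          | some m => if (if fl then m < p else p < m) then some p else some m)
        (if (if fl then m < x else x < m) then some x else some m) t =
      some (List.foldl (fun m p => if (if fl then m < p else p < m) then p else m)
        (if (if fl then m < x else x < m) then x else m) t)
    rw [← apply_ite some]
    exact ih _

theorem fold_none (fl : Bool) (P : List Int) :
    P.foldl
      (fun best p =>
        match best with
        | none => some p
        | some m => if (if fl then m < p else p < m) then some p else some m) none =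
    (if fl then PySem.List.max? P (fun x => x) else PySem.List.min? P (fun x => x)) := by
  cases P with
  | nil => cases fl <;> rfl
  | cons x t =>
    rw [List.foldl_cons]
    show _ = _
    cases fl with
    | true =>
      rw [run_some, PySem.List.max?_id_cons]
      congr 1
      apply PySem.List.foldl_congr_mem
      intro m p _
      simp only [if_true]
      rw [max_def]
      split_ifs <;> omega
    | false =>
      rw [run_some, PySem.List.min?_id_cons]
      congr 1
      apply PySem.List.foldl_congr_mem
      intro m p _
      simp only [Bool.false_eq_true, if_false]
      rw [min_def]
      split_ifs <;> omega

theorem B_eq_norm (words : List String) (idx : List (List String × List Int)) (n : Int) (fl : Bool) :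
    find_position_with_ngrams_alt words idx n fl = pvNorm n fl (pvPB words idx n) := by
  unfold find_position_with_ngrams_alt
  have hcond :
      idx.foldl
        (fun best kv =>
          if kv.1 ∈ PySem.Set.ofList (pvW words n) then
            kv.2.foldl
              (fun best p =>
                match best with
                | none => some p
                | some m => if (if fl then m < p else p < m) then some p else some m) best
          else best) none =
      (pvPB words idx n).foldl
        (fun best p =>
          match best with
          | none => some p
          | some m => if (if fl then m < p else p < m) then some p else some m) none := by
    rw [pvPB, List.foldl_flatMap, List.foldl_filter]
    apply PySem.List.foldl_congr_mem
    intro acc kv _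
    by_cases h : kv.1 ∈ pvW words n <;>
      simp [h, PySem.Set.mem_ofList]
  show (match
      idx.foldl
        (fun best kv =>
          if kv.1 ∈ PySem.Set.ofList (pvW words n) then
            kv.2.foldl
              (fun best p =>
                match best with
                | none => some p
                | some m => if (if fl then m < p else p < m) then some p else some m) best
          else best) none with
    | none => none
    | some b => if fl then some (b + (n - 1)) else some b) = _
  rw [hcond, fold_none]
  cases fl with
  | true => cases h : PySem.List.max? (pvPB words idx n) (fun x => x) <;> simp [pvNorm, h]
  | false => cases h : PySem.List.min? (pvPB words idx n) (fun x => x) <;> simp [pvNorm, h]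

-- first-match lookup in a duplicate-free association list is exactly membership
theorem get?_mk_eq_some_iff (idx : List (List String × List Int)) (w : List String)
    (vs : List Int) (hnd : (idx.map Prod.fst).Nodup) :
    (PySem.Dict.mk idx).get? w = some vs ↔ (w, vs) ∈ idx := by
  induction idx with
  | nil => simp [PySem.Dict.get?]
  | cons kv rest ih =>
    obtain ⟨k, v⟩ := kv
    rw [List.map_cons, List.nodup_cons] at hnd
    rw [PySem.Dict.get?_mk_cons]
    by_cases hk : k = w
    · subst hk
      rw [if_pos (by simp)]
      constructor
      · intro hv
        rw [← Option.some.inj hv]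
        exact List.mem_cons_self
      · intro hmem
        rcases List.mem_cons.mp hmem with h1 | h2
        · rw [(Prod.mk.injEq .. ▸ h1 : k = k ∧ vs = v).2]
        · exact absurd (List.mem_map.mpr ⟨(k, vs), h2, rfl⟩) hnd.1
    · rw [if_neg (by simpa using hk)]
      rw [ih hnd.2]
      simp only [List.mem_cons, Prod.mk.injEq]
      constructor
      · exact Or.inr
      · rintro (⟨hw, -⟩ | hmem)
        · exact absurd hw.symm hk
        · exact hmem

theorem mem_PA_iff_mem_PB (words : List String) (idx : List (List String × List Int)) (n : Int)
    (hnd : (idx.map Prod.fst).Nodup) (x : Int) :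
    x ∈ pvPA words idx n ↔ x ∈ pvPB words idx n := by
  simp only [pvPA, pvPB, List.mem_flatMap, List.mem_filter, decide_eq_true_eq]
  constructor
  · rintro ⟨w, hw, hx⟩
    cases hd : (PySem.Dict.mk idx).get? w with
    | none => rw [hd] at hx; simp at hx
    | some vs =>
      rw [hd] at hx
      exact ⟨(w, vs), ⟨(get?_mk_eq_some_iff idx w vs hnd).mp hd, hw⟩, by simpa using hx⟩
  · rintro ⟨kv, ⟨hmem, hw⟩, hx⟩
    refine ⟨kv.1, hw, ?_⟩
    rw [(get?_mk_eq_some_iff idx kv.1 kv.2 hnd).mpr (by simpa using hmem)]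
    simpa using hx

theorem min?_ext (P Q : List Int) (h : ∀ x, x ∈ P ↔ x ∈ Q) :
    PySem.List.min? P (fun x => x) = PySem.List.min? Q (fun x => x) := by
  cases hP : PySem.List.min? P (fun x => x) with
  | none =>
    cases hQ : PySem.List.min? Q (fun x => x) with
    | none => rfl
    | some b =>
      have hPe := (PySem.List.min?_eq_none_iff P (fun x => x)).mp hP
      have hbQ := PySem.List.min?_mem hQ
      rw [← h] at hbQ
      simp [hPe] at hbQ
  | some a =>
    cases hQ : PySem.List.min? Q (fun x => x) with
    | none =>
      have hQe := (PySem.List.min?_eq_none_iff Q (fun x => x)).mp hQ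
      have haP := PySem.List.min?_mem hP
      rw [h] at haP
      simp [hQe] at haP
    | some b =>
      have hab : a = b :=
        le_antisymm
          (PySem.List.min?_isMin hP b ((h b).mpr (PySem.List.min?_mem hQ)))
          (PySem.List.min?_isMin hQ a ((h a).mp (PySem.List.min?_mem hP)))
      rw [hab]

theorem max?_ext (P Q : List Int) (h : ∀ x, x ∈ P ↔ x ∈ Q) :
    PySem.List.max? P (fun x => x) = PySem.List.max? Q (fun x => x) := by
  cases hP : PySem.List.max? P (fun x => x) with
  | none =>
    cases hQ : PySem.List.max? Q (fun x => x) with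
    | none => rfl
    | some b =>
      have hPe := (PySem.List.max?_eq_none_iff P (fun x => x)).mp hP
      have hbQ := PySem.List.max?_mem hQ
      rw [← h] at hbQ
      simp [hPe] at hbQ
  | some a =>
    cases hQ : PySem.List.max? Q (fun x => x) with
    | none =>
      have hQe := (PySem.List.max?_eq_none_iff Q (fun x => x)).mp hQ
      have haP := PySem.List.max?_mem hP
      rw [h] at haP
      simp [hQe] at haP
    | some b =>
      have hab : a = b :=
        le_antisymm
          (PySem.List.max?_isMax hQ a ((h a).mp (PySem.List.max?_mem hP)))
          (PySem.List.max?_isMax hP b ((h b).mpr (PySem.List.max?_mem hQ)))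
      rw [hab]

theorem pvNorm_ext (n : Int) (fl : Bool) (P Q : List Int) (h : ∀ x, x ∈ P ↔ x ∈ Q) :
    pvNorm n fl P = pvNorm n fl Q := by
  unfold pvNorm
  rw [min?_ext P Q h, max?_ext P Q h]

-- ===== VERDICT (by name: the statement is the Claim_ definition above) =====
theorem find_position_with_ngrams_spec : Claim_equal_find_position_with_ngrams := by
  intro words ngram_index n find_last _ hpre
  unfold Spec_find_position_with_ngrams
  rw [A_eq_norm, B_eq_norm]
  exact pvNorm_ext n find_last _ _ (mem_PA_iff_mem_PB words ngram_index n hpre)
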